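-- pv_equiv track=rewrite | github.com/linhdvu14/cp-sols | sols/CodeChef/JUNE221A/DISTGCD.py | solve
-- ===== SOURCE A (Python) =====
-- def solve(a, b):
--     c = abs(a - b)
--     res = 0
--     d = 1
--     while d * d < c:
--         if c % d == 0: res += 2
--         d += 1
--     if d * d == c: res += 1
--     return res
-- ===== SOURCE B (Python) =====
-- def solve(a, b):
--     c = abs(a - b)
--     if c == 0:
--         return 0
--     res = 1
--     p = 2
--     while p * p <= c:
--         if c % p == 0:
--             e = 0
--             while c % p == 0:
--                 c //= p
--                 e += 1
--             res *= e + 1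
--         p += 1
--     if c > 1:
--         res *= 2
--     return res
-- ===== Notes on version B (the rewrite author's own statement) =====
-- stated objective: alternative
-- what changed: Replaces the sqrt-bounded paired divisor counting (add 2 per small divisor, plus a perfect-square correction) by trial-division prime factorization of c, returning the product of (exponent+1) over its prime factors.
import Mathlib
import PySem

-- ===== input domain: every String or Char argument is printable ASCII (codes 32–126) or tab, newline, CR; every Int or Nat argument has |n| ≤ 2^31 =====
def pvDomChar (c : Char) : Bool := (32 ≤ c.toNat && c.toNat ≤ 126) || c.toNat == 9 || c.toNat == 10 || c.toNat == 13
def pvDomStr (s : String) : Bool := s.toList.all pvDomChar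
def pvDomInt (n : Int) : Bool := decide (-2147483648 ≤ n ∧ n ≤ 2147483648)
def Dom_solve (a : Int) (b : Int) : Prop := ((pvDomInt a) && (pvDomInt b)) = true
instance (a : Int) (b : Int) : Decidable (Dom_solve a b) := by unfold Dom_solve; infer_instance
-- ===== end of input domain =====

-- B computes the divisor count of c = |a-b| via trial-division prime factorization (product of exponent+1), instead of A's sqrt-paired divisor counting; return-value equivalence only (neither mutates anything).

-- ===== PORT A =====
-- the 'while d * d < c' loop of A, with state (d, res); fuel only makes the recursion
-- total (solve passes enough for every input, so the fuel-0 branch is never reached)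
def solveLoop : Nat → Int → Int → Int → Int
  | 0, c, d, res => if d * d = c then res + 1 else res
  | fuel + 1, c, d, res =>
    if d * d < c then
      solveLoop fuel c (d + 1) (if PySem.Int.mod c d = 0 then res + 2 else res)
    else if d * d = c then res + 1 else res

def solve (a : Int) (b : Int) : Int := solveLoop (|a - b|).toNat (|a - b|) 1 0

-- ===== PORT B =====
-- the inner 'while c % p == 0' loop of B, with state (c, e); fuel only makes the
-- recursion total (factLoop passes enough at every call B's code reaches)
def trialDiv : Nat → Int → Int → Int → Int × Int
  | 0, c, _, e => (c, e)
  | fuel + 1, c, p, e =>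
    if PySem.Int.mod c p = 0 then
      trialDiv fuel (PySem.Int.floordiv c p) p (e + 1)
    else (c, e)

-- the 'while p * p <= c' loop of B, with state (c, p, res); fuel as above
def factLoop : Nat → Int → Int → Int → Int
  | 0, c, _, res => if 1 < c then res * 2 else res
  | fuel + 1, c, p, res =>
    if p * p ≤ c then
      if PySem.Int.mod c p = 0 then
        factLoop fuel (trialDiv c.toNat c p 0).1 (p + 1) (res * ((trialDiv c.toNat c p 0).2 + 1))
      else
        factLoop fuel c (p + 1) res
    else
      if 1 < c then res * 2 else res

def solve_alt (a : Int) (b : Int) : Int :=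
  let c := |a - b|
  if c = 0 then 0 else factLoop c.toNat c 2 1

-- ===== PRECONDITION & SPEC =====
def Spec_solve (a : Int) (b : Int) (out : Int) : Prop := out = solve_alt a b
instance (a : Int) (b : Int) (out : Int) : Decidable (Spec_solve a b out) := by unfold Spec_solve; infer_instance

-- ===== CLAIM (what is proved, stated in full; the proofs are below) =====
def Claim_equal_solve : Prop := ∀ (a : Int) (b : Int), Dom_solve a b → Spec_solve a b (solve a b)

-- ===== LEMMAS AND PROOFS =====

-- number of divisors e of n with d ≤ e and e*e < n (resp. e*e = n)
def cntS (n d : Nat) : Nat := ((Nat.divisors n).filter (fun e => d ≤ e ∧ e * e < n)).card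
def cntM (n d : Nat) : Nat := ((Nat.divisors n).filter (fun e => d ≤ e ∧ e * e = n)).card

lemma cntS_zero (n d : Nat) (h : n ≤ d * d) : cntS n d = 0 := by
  unfold cntS
  rw [Finset.card_eq_zero, Finset.filter_eq_empty_iff]
  intro e _
  rintro ⟨h1, h2⟩
  have : d * d ≤ e * e := Nat.mul_le_mul h1 h1
  omega

lemma cntM_zero (n d : Nat) (h : n < d * d) : cntM n d = 0 := by
  unfold cntM
  rw [Finset.card_eq_zero, Finset.filter_eq_empty_iff]
  intro e _
  rintro ⟨h1, h2⟩
  have : d * d ≤ e * e := Nat.mul_le_mul h1 h1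
  omega

lemma cntM_exit (n d : Nat) (hd : 1 ≤ d) (h : d * d = n) : cntM n d = 1 := by
  unfold cntM
  have hmem : d ∈ Nat.divisors n := by
    rw [Nat.mem_divisors]
    exact ⟨⟨d, h.symm⟩, by nlinarith⟩
  have hset : ((Nat.divisors n).filter (fun e => d ≤ e ∧ e * e = n)) = {d} := by
    ext e
    simp only [Finset.mem_filter, Finset.mem_singleton]
    constructor
    · rintro ⟨_, h1, h2⟩
      have : e * e = d * d := by omega
      exact (Nat.mul_self_inj.mp this)
    · rintro rfl
      exact ⟨hmem, le_refl _, h⟩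
  rw [hset]
  exact Finset.card_singleton d

lemma cntM_step (n d : Nat) (h : d * d < n) : cntM n d = cntM n (d + 1) := by
  unfold cntM
  congr 1
  apply Finset.filter_congr
  intro e _
  constructor
  · rintro ⟨h1, h2⟩
    rcases Nat.eq_or_lt_of_le h1 with rfl | hlt
    · omega
    · exact ⟨hlt, h2⟩
  · rintro ⟨h1, h2⟩; exact ⟨by omega, h2⟩

lemma cntS_step (n d : Nat) (h : d * d < n) (hd : 1 ≤ d) :
    cntS n d = (if d ∣ n then 1 else 0) + cntS n (d + 1) := by
  unfold cntS
  have hsplit := Finset.card_filter_add_card_filter_not (s := (Nat.divisors n).filter (fun e => d ≤ e ∧ e * e < n)) (fun e => e = d)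
  rw [Finset.filter_filter, Finset.filter_filter] at hsplit
  have h1 : ((Nat.divisors n).filter (fun e => (d ≤ e ∧ e * e < n) ∧ e = d)).card
      = if d ∣ n then 1 else 0 := by
    split_ifs with hdvd
    · have hset : ((Nat.divisors n).filter (fun e => (d ≤ e ∧ e * e < n) ∧ e = d)) = {d} := by
        ext e
        simp only [Finset.mem_filter, Finset.mem_singleton]
        constructor
        · rintro ⟨_, _, rfl⟩; rfl
        · rintro rfl
          exact ⟨Nat.mem_divisors.mpr ⟨hdvd, by omega⟩, ⟨le_refl _, h⟩, rfl⟩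
      rw [hset]
      exact Finset.card_singleton d
    · rw [Finset.card_eq_zero, Finset.filter_eq_empty_iff]
      intro e he
      rintro ⟨_, rfl⟩
      exact hdvd (Nat.mem_divisors.mp he).1
  have h2 : ((Nat.divisors n).filter (fun e => (d ≤ e ∧ e * e < n) ∧ ¬ e = d))
      = (Nat.divisors n).filter (fun e => d + 1 ≤ e ∧ e * e < n) := by
    apply Finset.filter_congr
    intro e _
    omega
  rw [h2] at hsplit
  omega

-- loop invariant of A's while loop
lemma loop_inv (k : Nat) : ∀ (n d : Nat) (res : Int), n - d ≤ k → 1 ≤ d →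
    solveLoop k (n : Int) (d : Int) res = res + 2 * (cntS n d : Int) + (cntM n d : Int) := by
  induction k with
  | zero =>
    intro n d res hk hd
    simp only [solveLoop]
    have hnd : n ≤ d := by omega
    have hle : n ≤ d * d := le_trans hnd (Nat.le_mul_of_pos_left d (by omega))
    by_cases heq : d * d = n
    · rw [if_pos (by exact_mod_cast heq)]
      rw [cntS_zero n d (by omega), cntM_exit n d hd heq]
      push_cast; ring
    · rw [if_neg (by exact_mod_cast heq)]
      rw [cntS_zero n d hle, cntM_zero n d (by omega)]
      push_cast; ring
  | succ k ih =>
    intro n d res hk hd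
    simp only [solveLoop]
    by_cases hlt : d * d < n
    · rw [if_pos (by exact_mod_cast hlt)]
      have hdn : d < n := by
        have : d ≤ d * d := Nat.le_mul_of_pos_left d (by omega)
        omega
      have hrec := ih n (d + 1) (if PySem.Int.mod (n : Int) (d : Int) = 0 then res + 2 else res)
        (by omega) (by omega)
      rw [show ((d : Int) + 1) = ((d + 1 : Nat) : Int) by push_cast; ring]
      rw [hrec]
      have hmod : (PySem.Int.mod (n : Int) (d : Int) = 0) ↔ d ∣ n := by
        rw [PySem.Int.mod_eq_zero_iff_dvd]
        exact Int.natCast_dvd_natCast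
      rw [cntS_step n d hlt hd, cntM_step n d hlt]
      by_cases hdvd : d ∣ n
      · rw [if_pos (hmod.mpr hdvd), if_pos hdvd]
        push_cast; ring
      · rw [if_neg (fun h => hdvd (hmod.mp h)), if_neg hdvd]
        push_cast; ring
    · have hnotlt : ¬ ((d : Int) * d < n) := by
        intro h; exact hlt (by exact_mod_cast h)
      rw [if_neg hnotlt]
      by_cases heq : d * d = n
      · rw [if_pos (by exact_mod_cast heq)]
        rw [cntS_zero n d (by omega), cntM_exit n d hd heq]
        push_cast; ring
      · rw [if_neg (by exact_mod_cast heq)]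
        rw [cntS_zero n d (by omega), cntM_zero n d (by omega)]
        push_cast; ring

-- the sqrt-pairing identity: the divisor count equals 2·(small divisors) + (perfect-square middle)
lemma tau_eq (n : Nat) : (Nat.divisors n).card = 2 * cntS n 1 + cntM n 1 := by
  have hS : cntS n 1 = ((Nat.divisors n).filter (fun e => e * e < n)).card := by
    unfold cntS
    congr 1
    apply Finset.filter_congr
    intro e he
    have := Nat.pos_of_mem_divisors he
    omega
  have hM : cntM n 1 = ((Nat.divisors n).filter (fun e => e * e = n)).card := by
    unfold cntM
    congr 1
    apply Finset.filter_congr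
    intro e he
    have := Nat.pos_of_mem_divisors he
    omega
  have hsplit1 := Finset.card_filter_add_card_filter_not (s := Nat.divisors n) (fun e => e * e < n)
  have hsplit2 := Finset.card_filter_add_card_filter_not
    (s := (Nat.divisors n).filter (fun e => ¬ e * e < n)) (fun e => e * e = n)
  rw [Finset.filter_filter, Finset.filter_filter] at hsplit2
  have hM' : ((Nat.divisors n).filter (fun e => ¬ e * e < n ∧ e * e = n))
      = (Nat.divisors n).filter (fun e => e * e = n) := by
    apply Finset.filter_congr; intro e _; omega
  have hL : ((Nat.divisors n).filter (fun e => ¬ e * e < n ∧ ¬ e * e = n))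
      = (Nat.divisors n).filter (fun e => n < e * e) := by
    apply Finset.filter_congr; intro e _; omega
  rw [hM', hL] at hsplit2
  -- the pairing d ↦ n / d between small and large divisors
  have hSL : ((Nat.divisors n).filter (fun e => e * e < n)).card
      = ((Nat.divisors n).filter (fun e => n < e * e)).card := by
    apply Finset.card_nbij' (fun e => n / e) (fun e => n / e)
    · intro e he
      simp only [Finset.coe_filter, Set.mem_setOf_eq] at he ⊢
      obtain ⟨hmem, hlt⟩ := he
      obtain ⟨hdvd, hn0⟩ := Nat.mem_divisors.mp hmem
      have he0 : 0 < e := Nat.pos_of_mem_divisors hmem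
      have hq : e * (n / e) = n := Nat.mul_div_cancel' hdvd
      have hq0 : 0 < n / e := by
        rcases Nat.eq_zero_or_pos (n / e) with h0 | h0
        · rw [h0, Nat.mul_zero] at hq; omega
        · exact h0
      refine ⟨Nat.mem_divisors.mpr ⟨Nat.div_dvd_of_dvd hdvd, hn0⟩, ?_⟩
      have helt : e < n / e := by nlinarith
      nlinarith
    · intro e he
      simp only [Finset.coe_filter, Set.mem_setOf_eq] at he ⊢
      obtain ⟨hmem, hlt⟩ := he
      obtain ⟨hdvd, hn0⟩ := Nat.mem_divisors.mp hmem
      have he0 : 0 < e := Nat.pos_of_mem_divisors hmem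
      have hq : e * (n / e) = n := Nat.mul_div_cancel' hdvd
      have hq0 : 0 < n / e := by
        rcases Nat.eq_zero_or_pos (n / e) with h0 | h0
        · rw [h0, Nat.mul_zero] at hq; omega
        · exact h0
      refine ⟨Nat.mem_divisors.mpr ⟨Nat.div_dvd_of_dvd hdvd, hn0⟩, ?_⟩
      have helt : n / e < e := by nlinarith
      nlinarith
    · intro e he
      simp only [Finset.coe_filter, Set.mem_setOf_eq] at he
      obtain ⟨hmem, _⟩ := he
      obtain ⟨hdvd, hn0⟩ := Nat.mem_divisors.mp hmem
      exact Nat.div_div_self hdvd hn0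
    · intro e he
      simp only [Finset.coe_filter, Set.mem_setOf_eq] at he
      obtain ⟨hmem, _⟩ := he
      obtain ⟨hdvd, hn0⟩ := Nat.mem_divisors.mp hmem
      exact Nat.div_div_self hdvd hn0
  rw [hS, hM]
  omega

-- B-side: the pyRange 1..c is the cast of List.range' 1 n
-- B-side: trialDiv strips off the full power of p dividing m
lemma trialDiv_spec (p : ℕ) (hp : 2 ≤ p) : ∀ (fuel m : ℕ), m ≤ fuel → 1 ≤ m → ∀ (e : Int),
    ∃ (k m' : ℕ), m = p ^ k * m' ∧ ¬ p ∣ m' ∧ 1 ≤ m' ∧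
      trialDiv fuel (m : Int) (p : Int) e = ((m' : Int), e + (k : Int)) := by
  intro fuel
  induction fuel with
  | zero => intro m hfuel hm; omega
  | succ fuel ih =>
    intro m hfuel hm e
    by_cases hd : p ∣ m
    · have hm2 : p * (m / p) = m := Nat.mul_div_cancel' hd
      have hm2pos : 1 ≤ m / p := by
        rcases Nat.eq_zero_or_pos (m / p) with h0 | h0
        · rw [h0, Nat.mul_zero] at hm2; omega
        · exact h0
      have hlt : m / p < m := Nat.div_lt_self (by omega) (by omega)
      obtain ⟨k, m', h1, h2, h3, h4⟩ := ih (m / p) (by omega) hm2pos (e + 1)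
      refine ⟨k + 1, m', ?_, h2, h3, ?_⟩
      · rw [pow_succ]
        calc m = p * (m / p) := hm2.symm
          _ = p * (p ^ k * m') := by rw [← h1]
          _ = p ^ k * p * m' := by ring
      · simp only [trialDiv]
        rw [if_pos ((PySem.Int.mod_eq_zero_iff_dvd _ _).mpr (Int.natCast_dvd_natCast.mpr hd))]
        rw [PySem.Int.floordiv_natCast, h4]
        congr 1
        push_cast
        ring
    · refine ⟨0, m, by ring, hd, hm, ?_⟩
      simp only [trialDiv]
      rw [if_neg (fun h0 => hd (Int.natCast_dvd_natCast.mp ((PySem.Int.mod_eq_zero_iff_dvd _ _).mp h0)))]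
      norm_num

-- B-side: a number > 1 below p² with no prime factor < p is prime, so the loop exit is correct
lemma factLoop_exit (m p : ℕ) (res : Int) (hm : 1 ≤ m) (hlt : m < p * p)
    (hmin : ∀ q, Nat.Prime q → q ∣ m → p ≤ q) :
    (if 1 < (m : Int) then res * 2 else res) = res * ((Nat.divisors m).card : Int) := by
  by_cases h1 : m = 1
  · subst h1
    rw [if_neg (by norm_num), Nat.divisors_one, Finset.card_singleton]
    ring
  · have hm2 : 2 ≤ m := by omega
    have hq : Nat.Prime m.minFac := Nat.minFac_prime h1
    have hqd : m.minFac ∣ m := Nat.minFac_dvd m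
    have hpq : p ≤ m.minFac := hmin _ hq hqd
    have ht : m.minFac * (m / m.minFac) = m := Nat.mul_div_cancel' hqd
    have htpos : 1 ≤ m / m.minFac := by
      rcases Nat.eq_zero_or_pos (m / m.minFac) with h0 | h0
      · rw [h0, Nat.mul_zero] at ht; omega
      · exact h0
    have hprime : m.Prime := by
      by_cases ht1 : m / m.minFac = 1
      · rw [ht1, Nat.mul_one] at ht
        rw [← ht]; exact hq
      · exfalso
        have hr : Nat.Prime (m / m.minFac).minFac := Nat.minFac_prime ht1
        have hrd : (m / m.minFac).minFac ∣ m / m.minFac := Nat.minFac_dvd _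
        have hrm : (m / m.minFac).minFac ∣ m := hrd.trans (Dvd.intro_left _ ht)
        have hpr : p ≤ (m / m.minFac).minFac := hmin _ hr hrm
        have hrt : (m / m.minFac).minFac ≤ m / m.minFac := Nat.le_of_dvd (by omega) hrd
        have : p * p ≤ m.minFac * (m / m.minFac) := Nat.mul_le_mul hpq (le_trans hpr hrt)
        omega
    rw [if_pos (by exact_mod_cast hm2), hprime.divisors,
      Finset.card_pair (by have := hprime.two_le; omega)]
    push_cast
    ring

-- B-side loop invariant: factLoop multiplies res by the divisor count of m when
-- m has no prime factor below p
lemma factLoop_eq (fuel : ℕ) : ∀ (m p : ℕ) (res : Int), m + 1 - p ≤ fuel → 1 ≤ m → 2 ≤ p →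
    (∀ q, Nat.Prime q → q ∣ m → p ≤ q) →
    factLoop fuel (m : Int) (p : Int) res = res * ((Nat.divisors m).card : Int) := by
  induction fuel with
  | zero =>
    intro m p res hfuel hm hp hmin
    have h1 : p ≤ p * p := Nat.le_mul_of_pos_left p (by omega)
    have hplt : m < p * p := by omega
    simp only [factLoop]
    exact factLoop_exit m p res hm hplt hmin
  | succ fuel ih =>
    intro m p res hfuel hm hp hmin
    simp only [factLoop]
    by_cases hpp : p * p ≤ m
    · rw [if_pos (by exact_mod_cast hpp)]
      have hple : p ≤ m := le_trans (Nat.le_mul_of_pos_left p (by omega)) hpp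
      by_cases hd : p ∣ m
      · -- p is the least prime factor of m, hence prime
        have hppr : p.Prime := by
          have hqp : Nat.Prime p.minFac := Nat.minFac_prime (by omega)
          have hqd : p.minFac ∣ m := (Nat.minFac_dvd p).trans hd
          have h1 : p ≤ p.minFac := hmin _ hqp hqd
          have h2 : p.minFac ≤ p := Nat.minFac_le (by omega)
          have : p.minFac = p := by omega
          rw [← this]; exact hqp
        rw [if_pos ((PySem.Int.mod_eq_zero_iff_dvd _ _).mpr (Int.natCast_dvd_natCast.mpr hd))]
        obtain ⟨k, m', h1, h2, h3, h4⟩ := trialDiv_spec p hp m m (le_refl m) hm 0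
        have hm'dvd : m' ∣ m := Dvd.intro_left _ h1.symm
        have hm'le : m' ≤ m := Nat.le_of_dvd (by omega) hm'dvd
        have hmin' : ∀ q, Nat.Prime q → q ∣ m' → p + 1 ≤ q := by
          intro q hq hqd
          have h5 := hmin q hq (hqd.trans hm'dvd)
          have : q ≠ p := by rintro rfl; exact h2 hqd
          omega
        have hrec := ih m' (p + 1) (res * ((0 : Int) + (k : Int) + 1)) (by omega) h3 (by omega) hmin'
        rw [Int.toNat_natCast, h4]
        simp only []
        rw [show ((p : Int) + 1) = ((p + 1 : Nat) : Int) by push_cast; ring, hrec]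
        -- divisor-count multiplicativity: τ(p^k · m') = (k+1) · τ(m')
        have hcop : (p ^ k).Coprime m' := Nat.Coprime.pow_left k ((Nat.Prime.coprime_iff_not_dvd hppr).mpr h2)
        rw [h1, Nat.Coprime.card_divisors_mul hcop, Nat.divisors_prime_pow hppr,
          Finset.card_map, Finset.card_range]
        push_cast
        ring
      · rw [if_neg (fun h0 => hd (Int.natCast_dvd_natCast.mp ((PySem.Int.mod_eq_zero_iff_dvd _ _).mp h0)))]
        have hmin' : ∀ q, Nat.Prime q → q ∣ m → p + 1 ≤ q := by
          intro q hq hqd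
          have h5 := hmin q hq hqd
          have : q ≠ p := by rintro rfl; exact hd hqd
          omega
        rw [show ((p : Int) + 1) = ((p + 1 : Nat) : Int) by push_cast; ring]
        exact ih m (p + 1) res (by omega) hm (by omega) hmin'
    · rw [if_neg (fun h => hpp (by exact_mod_cast h))]
      exact factLoop_exit m p res hm (by omega) hmin

lemma alt_eq (n : Nat) (a b : Int) (hc : |a - b| = (n : Int)) :
    solve_alt a b = ((Nat.divisors n).card : Int) := by
  unfold solve_alt
  simp only [hc]
  by_cases h0 : n = 0
  · subst h0
    simp
  · rw [if_neg (by exact_mod_cast h0), Int.toNat_natCast]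
    rw [show (2 : Int) = ((2 : Nat) : Int) by norm_num]
    exact factLoop_eq n n 2 1 (by omega) (by omega) (le_refl 2)
      (fun q hq _ => hq.two_le) |>.trans (by ring)

-- ===== VERDICT (by name: the statement is the Claim_ definition above) =====
theorem solve_spec : Claim_equal_solve := by
  intro a b _
  unfold Spec_solve
  set c := |a - b| with hc
  have hc0 : 0 ≤ c := abs_nonneg _
  obtain ⟨n, hn⟩ : ∃ n : Nat, c = (n : Int) := ⟨c.toNat, (Int.toNat_of_nonneg hc0).symm⟩
  have hA : solve a b = solveLoop n (n : Int) 1 0 := by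
    unfold solve
    rw [← hc, hn, Int.toNat_natCast]
  rw [hA, show (1 : Int) = ((1 : Nat) : Int) from rfl,
    loop_inv n n 1 0 (by omega) (le_refl 1)]
  rw [alt_eq n a b (by rw [← hc, hn]), tau_eq n]
  push_cast; ring
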